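-- pv_equiv track=rewrite | github.com/Lukasz13866417/KeyphraseActivation | data_generation/main_audio_generator.py | _build_api_sequence
-- ===== SOURCE A (Python) =====
-- from typing import Any, Callable, Dict, List, Optional, Sequence, Tuple
--
-- API_ORDER = ("piper", "bark", "kokoro", "eleven")
--
-- def _build_api_sequence(total_needed: int, base_counts: Dict[str, int]) -> List[str]:
--     """
--     Build a repeating API sequence based on the requested per-API counts.
--     """
--     if total_needed <= 0:
--         return []
--     template: List[str] = []
--     for api in API_ORDER:
--         repetitions = max(0, int(base_counts.get(api, 0)))
--         template.extend([api] * repetitions)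
--     if not template:
--         return []
--     sequence: List[str] = []
--     for idx in range(total_needed):
--         sequence.append(template[idx % len(template)])
--     return sequence
-- ===== SOURCE B (Python) =====
-- from typing import Dict, List
--
-- API_ORDER = ("piper", "bark", "kokoro", "eleven")
--
-- def _build_api_sequence(total_needed: int, base_counts: Dict[str, int]) -> List[str]:
--     # Consume `remaining` round by round: each pass takes up to each API's count,
--     # never materializing the template list or indexing with a modulo.
--     counts = [(api, max(0, int(base_counts.get(api, 0)))) for api in API_ORDER]
--     out: List[str] = []
--     remaining = total_needed
--     while remaining > 0:
--         progress = False
--         for api, c in counts: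
--             take = min(c, remaining)
--             if take:
--                 out.extend([api] * take)
--                 remaining -= take
--                 progress = True
--         if not progress:
--             return []
--     return out
-- ===== Notes on version B (the rewrite author's own statement) =====
-- stated objective: alternative
-- what changed: B never builds the template list nor indexes with idx % len: it keeps only per-API counts and consumes the remaining total round by round, each pass appending min(count, remaining) copies of each API, with a progress flag replacing A's empty-template guard.
import Mathlib
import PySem

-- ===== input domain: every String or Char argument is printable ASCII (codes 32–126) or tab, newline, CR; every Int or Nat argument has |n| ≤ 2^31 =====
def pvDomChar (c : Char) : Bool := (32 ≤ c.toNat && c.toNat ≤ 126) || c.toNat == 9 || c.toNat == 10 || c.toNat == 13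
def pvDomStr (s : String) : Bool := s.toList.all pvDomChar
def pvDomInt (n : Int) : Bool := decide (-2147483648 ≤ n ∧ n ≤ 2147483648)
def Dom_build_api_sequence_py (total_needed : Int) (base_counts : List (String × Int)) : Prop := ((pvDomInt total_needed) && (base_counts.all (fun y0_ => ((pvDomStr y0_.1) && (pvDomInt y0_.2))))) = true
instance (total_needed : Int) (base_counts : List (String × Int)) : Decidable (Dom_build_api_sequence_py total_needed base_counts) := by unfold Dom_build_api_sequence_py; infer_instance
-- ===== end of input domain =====

-- B replaces A's template list and per-index modulo loop by round-by-round consumption of the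
-- remaining total from a per-API counts list; objective: alternative (same asymptotic cost).

-- ===== PORT A =====
-- port of A's per-index loop; template[idx % len(template)] always hits, so pyGetD's default "" is never used
def build_api_sequence_py (total_needed : Int) (base_counts : List (String × Int)) : List String :=
  if total_needed ≤ 0 then []
  else
    let template : List String :=
      ["piper", "bark", "kokoro", "eleven"].foldl
        (fun t api => t ++ List.replicate (max 0 ((base_counts.lookup api).getD 0)).toNat api) []
    if template = [] then []
    else
      (PySem.List.pyRange 0 total_needed 1).foldl
        (fun s idx => s ++ [PySem.List.pyGetD template (PySem.Int.mod idx (template.length : Int)) ""]) []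

-- ===== PORT B =====
-- counts = [(api, max(0, int(base_counts.get(api, 0)))) for api in API_ORDER]; the count is a
-- nonnegative int, stored as Nat (exact, via .toNat of the max)
def bCounts (base_counts : List (String × Int)) : List (String × Nat) :=
  ["piper", "bark", "kokoro", "eleven"].map
    (fun api => (api, (max 0 ((base_counts.lookup api).getD 0)).toNat))

-- one iteration of the inner `for api, c in counts` body; state = (out, remaining, progress)
def bStep (st : List String × Int × Bool) (p : String × Nat) : List String × Int × Bool :=
  let take : Int := min (p.2 : Int) st.2.1
  if take ≠ 0 then (st.1 ++ List.replicate take.toNat p.1, st.2.1 - take, true) else st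

-- one full pass of the `for` loop
def bPass (counts : List (String × Nat)) (out : List String) (remaining : Int) :
    List String × Int × Bool :=
  counts.foldl bStep (out, remaining, false)

-- termination of the while loop: a pass never increases `remaining`, keeps it ≥ 0, and if it
-- reports progress it strictly decreased it
theorem bStep_fold_inv (counts : List (String × Nat)) (st : List String × Int × Bool)
    (h0 : 0 ≤ st.2.1) :
    0 ≤ (counts.foldl bStep st).2.1 ∧ (counts.foldl bStep st).2.1 ≤ st.2.1 ∧
      ((counts.foldl bStep st).2.2 = true → st.2.2 = true ∨ (counts.foldl bStep st).2.1 < st.2.1) := by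
  induction counts generalizing st with
  | nil => exact ⟨h0, le_refl _, fun h => Or.inl h⟩
  | cons p rest ih =>
    simp only [List.foldl_cons]
    by_cases ht : min (p.2 : Int) st.2.1 ≠ 0
    · have hstep : bStep st p = (st.1 ++ List.replicate (min (p.2 : Int) st.2.1).toNat p.1,
          st.2.1 - min (p.2 : Int) st.2.1, true) := by
        simp [bStep, ht]
      have hmin : 0 < min (p.2 : Int) st.2.1 := by
        have hge : (0:Int) ≤ min (p.2 : Int) st.2.1 := le_min (by positivity) h0
        omega
      rw [hstep]
      obtain ⟨a, b, c⟩ := ih (st.1 ++ List.replicate (min (p.2 : Int) st.2.1).toNat p.1,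
        st.2.1 - min (p.2 : Int) st.2.1, true) (by simp only; omega)
      refine ⟨a, le_trans b (by simp only; omega), fun h => Or.inr ?_⟩
      rcases c h with h' | h'
      · simp at b ⊢; omega
      · simp at h' ⊢; omega
    · have hstep : bStep st p = st := by simp [bStep]; omega
      rw [hstep]; exact ih st h0

-- the `while remaining > 0` loop; returns [] when a pass makes no progress (empty counts)
def bLoop (counts : List (String × Nat)) (out : List String) (remaining : Int) : List String :=
  if h : 0 < remaining then
    let st := bPass counts out remaining
    if hp : st.2.2 = true then bLoop counts st.1 st.2.1 else []
  else out
termination_by remaining.toNat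
decreasing_by
  obtain ⟨a, b, c⟩ := bStep_fold_inv counts (out, remaining, false) (le_of_lt h)
  simp only [bPass] at hp ⊢
  rcases c hp with h' | h'
  · exact absurd h' (by simp)
  · simp only at a b h'
    omega

def build_api_sequence_py_alt (total_needed : Int) (base_counts : List (String × Int)) : List String :=
  bLoop (bCounts base_counts) [] total_needed

-- ===== PRECONDITION & SPEC =====
def Spec_build_api_sequence_py (total_needed : Int) (base_counts : List (String × Int)) (out : List String) : Prop := out = build_api_sequence_py_alt total_needed base_counts
instance (total_needed : Int) (base_counts : List (String × Int)) (out : List String) : Decidable (Spec_build_api_sequence_py total_needed base_counts out) := by unfold Spec_build_api_sequence_py; infer_instance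

-- ===== CLAIM (what is proved, stated in full; the proofs are below) =====
def Claim_equal_build_api_sequence_py : Prop := ∀ (total_needed : Int) (base_counts : List (String × Int)), Dom_build_api_sequence_py total_needed base_counts → Spec_build_api_sequence_py total_needed base_counts (build_api_sequence_py total_needed base_counts)

-- ===== LEMMAS AND PROOFS =====

-- the template both programs conceptually cycle through
def tmpl (counts : List (String × Nat)) : List String :=
  counts.flatMap (fun p => List.replicate p.2 p.1)

-- A's cycling loop over range(n), in Nat form, equals whole copies + remainder.
theorem cycle_loop_eq (t : List String) (ht : t ≠ []) (n : ℕ) :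
    (PySem.List.pyRange 0 (n : Int) 1).foldl
        (fun s idx => s ++ [PySem.List.pyGetD t (PySem.Int.mod idx (t.length : Int)) ""]) []
      = (List.replicate (n / t.length) t).flatten ++ t.take (n % t.length) := by
  have hL : 0 < t.length := List.length_pos_iff.mpr ht
  induction n with
  | zero => simp [PySem.List.pyRange_one_eq_nil]
  | succ n ih =>
    have hc : ((n + 1 : ℕ) : Int) = (n : Int) + 1 := by push_cast; ring
    have hsplit : PySem.List.pyRange 0 ((n : Int) + 1) 1
        = PySem.List.pyRange 0 (n : Int) 1 ++ [(n : Int)] :=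
      PySem.List.pyRange_one_succ_right (by exact_mod_cast Nat.zero_le n)
    have hmod : PySem.Int.mod (n : Int) (t.length : Int) = ((n % t.length : ℕ) : Int) :=
      PySem.Int.mod_natCast n t.length
    rw [hc, hsplit, List.foldl_append, ih]
    simp only [List.foldl_cons, List.foldl_nil, hmod, PySem.List.pyGetD_natCast]
    have hlt : n % t.length < t.length := Nat.mod_lt _ hL
    have htake : t.take (n % t.length) ++ [t.getD (n % t.length) ""]
        = t.take (n % t.length + 1) := by
      rw [List.getD_eq_getElem t "" hlt]
      exact List.take_concat_get' t _ hlt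
    by_cases hlast : n % t.length = t.length - 1
    · have hdm := Nat.div_add_mod n t.length
      have hrep : n + 1 = (n / t.length + 1) * t.length := by
        calc n + 1 = t.length * (n / t.length) + (n % t.length + 1) := by omega
          _ = t.length * (n / t.length) + t.length := by
                congr 1; omega
          _ = (n / t.length + 1) * t.length := by ring
      have h1 : (n + 1) % t.length = 0 := by rw [hrep]; exact Nat.mul_mod_left _ _
      have h2 : (n + 1) / t.length = n / t.length + 1 := by
        rw [hrep]; exact Nat.mul_div_cancel _ hL
      rw [List.append_assoc, htake, h1, h2]
      have : n % t.length + 1 = t.length := by omega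
      rw [this, List.take_length, List.take_zero, List.append_nil,
        List.replicate_succ', List.flatten_append]
      simp
    · have h1 : (n + 1) % t.length = n % t.length + 1 := by
        rw [← Nat.mod_add_mod]; exact Nat.mod_eq_of_lt (by omega)
      have h2 : (n + 1) / t.length = n / t.length := by
        rw [Nat.succ_div, if_neg, Nat.add_zero]
        intro hdvd
        have h0 : (n + 1) % t.length = 0 := Nat.mod_eq_zero_of_dvd hdvd
        omega
      rw [List.append_assoc, htake, h1, h2]

-- one pass of B appends exactly the first min(remaining, |template|) template elements
theorem bStep_fold_eq (counts : List (String × Nat)) (out : List String) (rem : ℕ) (prog : Bool) :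
    counts.foldl bStep (out, (rem : Int), prog)
      = (out ++ (tmpl counts).take (min rem (tmpl counts).length),
          ((rem - min rem (tmpl counts).length : ℕ) : Int),
          prog || decide (0 < min rem (tmpl counts).length)) := by
  induction counts generalizing out rem prog with
  | nil => simp [tmpl]
  | cons p rest ih =>
    have htmpl : tmpl (p :: rest) = List.replicate p.2 p.1 ++ tmpl rest := by
      simp [tmpl]
    simp only [List.foldl_cons, htmpl, List.length_append, List.length_replicate]
    by_cases ht : min (p.2 : Int) (rem : Int) ≠ 0
    · have hstep : bStep (out, (rem : Int), prog) p
          = (out ++ List.replicate (min (p.2 : Int) (rem : Int)).toNat p.1,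
             (rem : Int) - min (p.2 : Int) (rem : Int), true) := by
        simp [bStep, ht]
      have hmin : (min (p.2 : Int) (rem : Int)) = ((min p.2 rem : ℕ) : Int) := by
        push_cast; omega
      have hrem : (rem : Int) - ((min p.2 rem : ℕ) : Int) = ((rem - min p.2 rem : ℕ) : Int) := by
        push_cast; omega
      rw [hstep, hmin, hrem, ih]
      refine Prod.ext ?_ (Prod.ext ?_ ?_)
      · simp only [Int.toNat_natCast, List.take_append, List.take_replicate,
          List.length_replicate, List.append_assoc]
        congr 2
        · congr 1; omega
        · congr 1; omega
      · simp only; push_cast; omega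
      · simp only [Bool.true_or]
        have : 0 < min rem (p.2 + (tmpl rest).length) := by
          have : (min (p.2 : Int) (rem : Int)) ≠ 0 := ht
          rcases Nat.eq_zero_or_pos p.2 with h | h
          · omega
          · rcases Nat.eq_zero_or_pos rem with h' | h'
            · exfalso; apply ht; omega
            · omega
        simp [this]
    · push_neg at ht
      have hz : p.2 = 0 ∨ rem = 0 := by omega
      have hstep : bStep (out, (rem : Int), prog) p = (out, (rem : Int), prog) := by
        simp [bStep, ht]
      rw [hstep, ih]
      rcases hz with h | h <;> simp [h]

-- B's while loop computes whole copies + remainder of the template (nonempty template)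
theorem bLoop_eq (counts : List (String × Nat)) (hne : tmpl counts ≠ []) (out : List String) (n : ℕ) :
    bLoop counts out (n : Int)
      = out ++ (List.replicate (n / (tmpl counts).length) (tmpl counts)).flatten
          ++ (tmpl counts).take (n % (tmpl counts).length) := by
  have hL : 0 < (tmpl counts).length := List.length_pos_iff.mpr hne
  induction n using Nat.strong_induction_on generalizing out with
  | _ n ih =>
    rcases Nat.eq_zero_or_pos n with h0 | h0
    · subst h0
      rw [bLoop]
      simp [hL, Nat.zero_div, Nat.zero_mod]
    · rw [bLoop]
      have hpos : (0:Int) < (n : Int) := by exact_mod_cast h0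
      rw [dif_pos hpos]
      have hp := bStep_fold_eq counts out n false
      simp only [bPass, hp]
      have hm : 0 < min n (tmpl counts).length := by omega
      simp only [Bool.false_or, decide_eq_true_eq, hm, dif_pos, if_pos]
      by_cases hlt : n < (tmpl counts).length
      · have hmin : min n (tmpl counts).length = n := by omega
        rw [hmin, Nat.sub_self, Nat.cast_zero]
        have h00 : bLoop counts (out ++ List.take n (tmpl counts)) (0 : Int)
            = out ++ List.take n (tmpl counts) := by
          rw [bLoop]; simp
        rw [h00]
        have hdiv : n / (tmpl counts).length = 0 := Nat.div_eq_of_lt hlt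
        have hmod : n % (tmpl counts).length = n := Nat.mod_eq_of_lt hlt
        simp [hdiv, hmod]
      · push_neg at hlt
        have hmin : min n (tmpl counts).length = (tmpl counts).length := by omega
        rw [hmin]
        have hlt2 : n - (tmpl counts).length < n := by omega
        rw [ih (n - (tmpl counts).length) hlt2]
        have hdiv : n / (tmpl counts).length = (n - (tmpl counts).length) / (tmpl counts).length + 1 := by
          rw [Nat.div_eq_sub_div hL hlt]
        have hmod : n % (tmpl counts).length = (n - (tmpl counts).length) % (tmpl counts).length := by
          rw [Nat.mod_eq_sub_mod hlt]
        rw [hdiv, hmod, List.take_length, List.replicate_succ, List.flatten_cons]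
        simp [List.append_assoc]

-- ===== VERDICT (by name: the statement is the Claim_ definition above) =====
theorem build_api_sequence_py_spec : Claim_equal_build_api_sequence_py := by
  intro total_needed base_counts _
  unfold Spec_build_api_sequence_py build_api_sequence_py build_api_sequence_py_alt
  by_cases hpos : total_needed ≤ 0
  · rw [if_pos hpos, bLoop, dif_neg (by omega)]
  · rw [if_neg hpos]
    have htmpl : (["piper", "bark", "kokoro", "eleven"].foldl
        (fun t api => t ++ List.replicate (max 0 ((base_counts.lookup api).getD 0)).toNat api)
        ([] : List String)) = tmpl (bCounts base_counts) := by
      rw [PySem.List.foldl_append_eq_flatMap]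
      simp [tmpl, bCounts, List.flatMap_map]
    rw [htmpl]
    obtain ⟨n, hn⟩ : ∃ n : ℕ, total_needed = (n : Int) :=
      ⟨total_needed.toNat, (Int.toNat_of_nonneg (by omega)).symm⟩
    subst hn
    by_cases ht : tmpl (bCounts base_counts) = []
    · rw [if_pos ht, bLoop, dif_pos (by omega : (0:Int) < (n:Int))]
      have hp := bStep_fold_eq (bCounts base_counts) [] n false
      simp only [bPass, hp, ht, List.length_nil, Nat.min_zero, Nat.lt_irrefl, decide_false,
        Bool.false_or]
      simp
    · rw [if_neg ht, cycle_loop_eq _ ht n, bLoop_eq _ ht [] n]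
      simp
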